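-- pv_equiv track=rewrite | github.com/juhanfreitas/pybooking | app/criptography.py | cript
-- ===== SOURCE A (Python) =====
-- import math
--
-- def cript(message):
--     '''
--     A function that cript the message passed for it.
--
--         Parameters:
--             message (str): A string that contains the message to be cripted.
--
--         Returns:
--             cripted_message (str): A string that contains the cripted message.
--     '''
--
--     message = message[::-1]
--     cripted_message = ""
--     message_lists = []
--
--     for i in range(math.ceil(len(message)/2)):
--         message_lists.append([])
--
--     for i in range(len(message)):
--         message_lists[i//2].append(message[i])
--
--     for section in message_lists:
--         section = section[::-1]
--         for letter in section:
--             cripted_message += letter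
--
--     return cripted_message
-- ===== SOURCE B (Python) =====
-- def cript(message):
--     # One backward pass: take characters two at a time from the end,
--     # each pair in forward order; a final lone char (odd length) alone.
--     out = []
--     i = len(message) - 1
--     while i >= 0:
--         if i - 1 >= 0:
--             out.append(message[i - 1])
--             out.append(message[i])
--         else:
--             out.append(message[i])
--         i -= 2
--     return ''.join(out)
-- ===== Notes on version B (the rewrite author's own statement) =====
-- stated objective: simpler
-- what changed: Replaces the reversal plus three loops over an intermediate list-of-pairs with a single backward index pass that emits each pair of characters directly.
import Mathlib
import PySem

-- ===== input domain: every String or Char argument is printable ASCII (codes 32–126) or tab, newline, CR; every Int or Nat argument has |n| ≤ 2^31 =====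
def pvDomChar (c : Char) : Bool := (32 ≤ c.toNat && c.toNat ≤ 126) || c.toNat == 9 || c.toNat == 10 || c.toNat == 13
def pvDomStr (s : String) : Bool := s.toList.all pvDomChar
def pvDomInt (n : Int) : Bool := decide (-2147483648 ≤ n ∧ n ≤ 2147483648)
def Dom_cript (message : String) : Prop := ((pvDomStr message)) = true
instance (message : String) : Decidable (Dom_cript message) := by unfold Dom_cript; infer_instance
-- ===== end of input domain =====

-- B replaces A's reversal + three loops over an intermediate list-of-pairs by a
-- single backward pass emitting each pair directly (objective: simpler).

-- ===== PORT A =====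
-- the body of A's second loop: message_lists[i//2].append(message[i])
def criptStep (msg : List Char) (ls : List (List Char)) (i : Int) : List (List Char) :=
  PySem.List.pySetD ls (PySem.Int.floordiv i 2)
    ((PySem.List.pyGetD ls (PySem.Int.floordiv i 2) []) ++ [PySem.List.pyGetD msg i ' '])

def cript (message : String) : String :=
  -- message = message[::-1]
  let msg : List Char := (PySem.List.slice? message.toList none none (-1)).getD []
  let n : Int := msg.length
  -- math.ceil(len(message)/2) = (len+1)//2 exactly, since len ≥ 0
  let m : Int := PySem.Int.floordiv (n + 1) 2
  -- for i in range(m): message_lists.append([])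
  let lists0 : List (List Char) :=
    List.foldl (fun ls (_ : Int) => ls ++ [[]]) [] (PySem.List.pyRange 0 m 1)
  -- for i in range(len(message)): message_lists[i//2].append(message[i])
  let lists := List.foldl (criptStep msg) lists0 (PySem.List.pyRange 0 n 1)
  -- for section in message_lists: section = section[::-1]; for letter in section: cripted_message += letter
  let out : List Char :=
    List.foldl (fun acc sec =>
      List.foldl (fun a c => a ++ [c]) acc ((PySem.List.slice? sec none none (-1)).getD []))
      [] lists
  String.ofList out

-- ===== PORT B =====
-- the while loop, driven by i+1 so that it is structural recursion:
-- fuel i+2 means index i+1 with i-1 >= 0; fuel 1 means index 0 (lone char); fuel 0 means loop done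
def criptAltLoop (cs : List Char) : Nat → List Char
  | 0 => []
  | 1 => [cs.getD 0 ' ']
  | (i+2) => cs.getD i ' ' :: cs.getD (i+1) ' ' :: criptAltLoop cs i

def cript_alt (message : String) : String :=
  String.ofList (criptAltLoop message.toList message.toList.length)

-- ===== PRECONDITION & SPEC =====
def Spec_cript (message : String) (out : String) : Prop := out = cript_alt message
instance (message : String) (out : String) : Decidable (Spec_cript message out) := by unfold Spec_cript; infer_instance

-- ===== CLAIM (what is proved, stated in full; the proofs are below) =====
def Claim_equal_cript : Prop := ∀ (message : String), Dom_cript message → Spec_cript message (cript message)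

-- ===== LEMMAS AND PROOFS =====

-- the two-chunks of a list
def chunk2 : List Char → List (List Char)
  | [] => []
  | [a] => [[a]]
  | a :: b :: t => [a, b] :: chunk2 t

-- swap adjacent pairs
def pairSwap : List Char → List Char
  | [] => []
  | [a] => [a]
  | a :: b :: t => b :: a :: pairSwap t

theorem foldl_snoc_nil (l : List Int) (acc : List (List Char)) :
    List.foldl (fun ls (_ : Int) => ls ++ [[]]) acc l
      = acc ++ List.replicate l.length [] := by
  induction l generalizing acc with
  | nil => simp
  | cons x t ih => simp [List.foldl, ih, List.replicate_succ]

theorem foldl_append_one (l : List Char) (acc : List Char) :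
    List.foldl (fun a c => a ++ [c]) acc l = acc ++ l := by
  induction l generalizing acc with
  | nil => simp
  | cons x t ih => simp [List.foldl, ih]

theorem getD_append_len (done : List (List Char)) (x : List Char) (rest : List (List Char)) :
    (done ++ x :: rest).getD done.length [] = x := by
  simp [List.getD]

theorem set_append_len (done : List (List Char)) (x y : List Char) (rest : List (List Char)) :
    (done ++ x :: rest).set done.length y = done ++ y :: rest := by
  rw [List.set_append_right _ _ (Nat.le_refl _)]
  simp

theorem getD_char_append_len (pre : List Char) (a : Char) (t : List Char) :
    (pre ++ a :: t).getD pre.length ' ' = a := by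
  simp [List.getD]

theorem key (r : List Char) :
    ∀ (t pre : List Char) (done : List (List Char)),
    r = pre ++ t → pre.length = 2 * done.length →
    List.foldl (criptStep r) (done ++ List.replicate ((t.length + 1) / 2) [])
      ((List.range' pre.length t.length).map (fun (j : Nat) => (j : Int)))
      = done ++ chunk2 t := by
  intro t
  induction t using chunk2.induct with
  | case1 =>
    intro pre done hr hlen
    simp [chunk2]
  | case2 a =>
    intro pre done hr hlen
    have hd1 : PySem.Int.floordiv ((pre.length : Nat) : Int) 2 = ((done.length : Nat) : Int) := by
      simp [hlen]
    have hrep : (([a] : List Char).length + 1) / 2 = 1 := by simp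
    rw [hrep]
    have hrng : (List.range' pre.length ([a] : List Char).length).map (fun (j : Nat) => (j : Int))
        = [((pre.length : Nat) : Int)] := by
      simp [List.range'_succ]
    rw [hrng]
    show List.foldl (criptStep r) (done ++ [[]]) [((pre.length : Nat) : Int)] = done ++ chunk2 [a]
    simp only [List.foldl_cons, List.foldl_nil, criptStep, hd1,
      PySem.List.pySetD_natCast, PySem.List.pyGetD_natCast, hr]
    rw [getD_append_len done [] [], getD_char_append_len pre a [], set_append_len]
    simp [chunk2]
  | case3 a b t ih =>
    intro pre done hr hlen
    have hd1 : PySem.Int.floordiv ((pre.length : Nat) : Int) 2 = ((done.length : Nat) : Int) := by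
      simp [hlen]
    have hd2 : PySem.Int.floordiv (((pre.length + 1 : Nat)) : Int) 2 = ((done.length : Nat) : Int) := by
      simp [hlen]
      omega
    have hflen : ((a :: b :: t).length + 1) / 2 = (t.length + 1) / 2 + 1 := by
      simp only [List.length_cons]; omega
    rw [hflen, List.replicate_succ]
    have hrange : (List.range' pre.length (a :: b :: t).length).map (fun (j : Nat) => (j : Int))
        = ((pre.length : Nat) : Int) :: (((pre.length + 1 : Nat)) : Int)
          :: (List.range' (pre.length + 1 + 1) t.length).map (fun (j : Nat) => (j : Int)) := by
      simp only [List.length_cons, List.range'_succ, List.map_cons]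
    rw [hrange]
    simp only [List.foldl_cons]
    have step1 : criptStep r (done ++ [] :: List.replicate ((t.length + 1) / 2) []) ((pre.length : Nat) : Int)
        = done ++ [a] :: List.replicate ((t.length + 1) / 2) [] := by
      simp only [criptStep, hd1, PySem.List.pySetD_natCast, PySem.List.pyGetD_natCast, hr]
      rw [getD_append_len, getD_char_append_len pre a (b :: t), set_append_len]
      simp
    have step2 : criptStep r (done ++ [a] :: List.replicate ((t.length + 1) / 2) []) (((pre.length + 1 : Nat)) : Int)
        = done ++ [a, b] :: List.replicate ((t.length + 1) / 2) [] := by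
      simp only [criptStep, hd2, PySem.List.pySetD_natCast, PySem.List.pyGetD_natCast, hr]
      rw [getD_append_len]
      have hsplit : pre ++ a :: b :: t = (pre ++ [a]) ++ b :: t := by simp
      have hb : (pre ++ a :: b :: t).getD (pre.length + 1) ' ' = b := by
        rw [hsplit]
        have hl : pre.length + 1 = (pre ++ [a]).length := by simp
        rw [hl, getD_char_append_len (pre ++ [a]) b t]
      rw [hb, set_append_len]
      simp
    rw [step1, step2]
    have hih := ih (pre ++ [a, b]) (done ++ [[a, b]])
      (by rw [hr]; simp) (by simp only [List.length_append, List.length_cons, List.length_nil]; omega)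
    simp only [List.length_append, List.length_cons, List.length_nil] at hih
    rw [show done ++ [a, b] :: List.replicate ((t.length + 1) / 2) []
        = (done ++ [[a, b]]) ++ List.replicate ((t.length + 1) / 2) [] by simp]
    rw [show pre.length + 1 + 1 = pre.length + 2 by omega]
    rw [hih]
    simp [chunk2]


-- third loop: concatenating the reversed chunks is pairSwap
theorem third_loop (t : List Char) (acc : List Char) :
    List.foldl (fun a sec =>
        List.foldl (fun x c => x ++ [c]) a ((PySem.List.slice? sec none none (-1)).getD []))
      acc (chunk2 t) = acc ++ pairSwap t := by
  have hfun : (fun (a : List Char) (sec : List Char) =>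
      List.foldl (fun x c => x ++ [c]) a ((PySem.List.slice? sec none none (-1)).getD []))
      = fun a sec => a ++ sec.reverse := by
    funext a sec
    rw [PySem.List.slice?_none_none_neg_one]
    exact foldl_append_one sec.reverse a
  rw [hfun]
  induction t using chunk2.induct generalizing acc with
  | case1 => simp [chunk2, pairSwap]
  | case2 a => simp [chunk2, pairSwap]
  | case3 a b t ih =>
    simp only [chunk2, pairSwap, List.foldl_cons]
    rw [ih]
    simp

-- B's loop computes pairSwap of the reversed prefix
theorem altLoop_eq (cs : List Char) :
    ∀ n, n ≤ cs.length → criptAltLoop cs n = pairSwap ((cs.take n).reverse) := by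
  intro n
  induction n using Nat.strong_induction_on with
  | _ n ih =>
    match n with
    | 0 => intro _; simp [criptAltLoop, pairSwap]
    | 1 =>
      intro h
      have h0 : 0 < cs.length := by omega
      rw [criptAltLoop]
      have h1 : cs.take 1 = [cs[0]] := by
        cases cs with
        | nil => simp at h0
        | cons x t => simp
      simp [h1, pairSwap, List.getD, List.getElem?_eq_getElem h0]
    | (m+2) =>
      intro h
      rw [criptAltLoop]
      have hm : m < cs.length := by omega
      have hm1 : m + 1 < cs.length := by omega
      have htake : cs.take (m + 2) = cs.take m ++ [cs[m], cs[m+1]] := by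
        rw [show m + 2 = (m + 1) + 1 from rfl]
        rw [List.take_add_one, List.take_add_one]
        rw [List.getElem?_eq_getElem hm, List.getElem?_eq_getElem hm1]
        simp only [Option.toList_some, List.append_assoc, List.cons_append, List.nil_append]
      rw [htake]
      simp only [List.reverse_append, List.reverse_cons, List.reverse_nil, List.nil_append,
        List.cons_append, List.append_assoc]
      show cs.getD m ' ' :: cs.getD (m+1) ' ' :: criptAltLoop cs m
          = pairSwap (cs[m+1] :: cs[m] :: (cs.take m).reverse)
      rw [pairSwap, ih m (by omega) (by omega)]
      simp [List.getD, List.getElem?_eq_getElem hm, List.getElem?_eq_getElem hm1]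

theorem length_pyRange_zero (n : Nat) :
    (PySem.List.pyRange 0 (n : Int) 1).length = n := by
  rw [PySem.List.length_pyRange_one]
  simp

theorem pyRange_zero_eq (n : Nat) :
    PySem.List.pyRange 0 (n : Int) 1 = (List.range' 0 n).map (fun (j : Nat) => (j : Int)) := by
  have ht : ((n : Int) - 0).toNat = n := by omega
  rw [PySem.List.pyRange_one, ht, ← List.range_eq_range']
  simp

-- ===== VERDICT (by name: the statement is the Claim_ definition above) =====
theorem cript_spec : Claim_equal_cript := by
  intro message _
  unfold Spec_cript cript cript_alt
  rw [PySem.List.slice?_none_none_neg_one]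
  simp only [Option.getD_some]
  set cs := message.toList with hcs
  set msg := cs.reverse with hmsg
  have hn : (msg.length : Int) + 1 = ((msg.length + 1 : Nat) : Int) := by push_cast; ring
  have hm : PySem.Int.floordiv ((msg.length : Int) + 1) 2 = (((msg.length + 1) / 2 : Nat) : Int) := by
    rw [hn]; simp
  rw [hm, foldl_snoc_nil, length_pyRange_zero, pyRange_zero_eq]
  have hkey := key msg msg [] [] (by simp) (by simp)
  simp only [List.length_nil, List.nil_append] at hkey
  rw [show ([] : List (List Char)) ++ List.replicate ((msg.length + 1) / 2) [] =
      List.replicate ((msg.length + 1) / 2) ([] : List Char) from List.nil_append _] at *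
  rw [hkey, third_loop]
  rw [altLoop_eq cs cs.length (Nat.le_refl _)]
  simp [hmsg]
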